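-- pv_equiv track=rewrite | github.com/madhav06/Coding-Interviews | InterviewBit_Problems/strings/Vowel_Consonant_Substring.py | solve
-- ===== SOURCE A (Python) =====
-- def solve(A):
--     vowels = {'a', 'e', 'i', 'o', 'u'}
--     count_v = 0
--     count_c = 0
--
--     for c in A:
--         if c in vowels:
--             count_v += 1
--         else:
--             count_c += 1
--
--     return (count_v * count_c) % 1000000007
-- ===== SOURCE B (Python) =====
-- def solve(A):
--     count_v = 0
--     for v in 'aeiou':
--         count_v += A.count(v)
--     return (count_v * (len(A) - count_v)) % 1000000007
-- ===== Notes on version B (the rewrite author's own statement) =====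
-- stated objective: faster
-- what changed: Instead of one per-character loop with two counters, B makes five whole-string str.count passes (one per vowel), sums them, and derives the consonant count as len(A) minus the vowel sum.
import Mathlib
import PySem

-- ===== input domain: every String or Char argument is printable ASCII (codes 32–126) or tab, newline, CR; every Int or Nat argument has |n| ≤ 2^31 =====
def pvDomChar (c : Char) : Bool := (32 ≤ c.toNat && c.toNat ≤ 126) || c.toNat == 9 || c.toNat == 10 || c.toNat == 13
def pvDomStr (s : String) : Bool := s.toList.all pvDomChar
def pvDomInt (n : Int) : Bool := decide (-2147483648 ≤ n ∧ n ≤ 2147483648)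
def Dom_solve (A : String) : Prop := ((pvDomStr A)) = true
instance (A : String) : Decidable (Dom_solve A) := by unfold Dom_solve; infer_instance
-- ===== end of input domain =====

-- B replaces A's per-character two-counter loop by five whole-string str.count passes
-- (one per vowel), deriving the consonant count as len(A) minus the vowel sum
-- (objective: faster by constant factor, measured).

-- ===== PORT A =====
def solve (A : String) : Int :=
  let vowels : PySem.Set Char := PySem.Set.ofList ['a', 'e', 'i', 'o', 'u']
  let st : Int × Int :=
    A.toList.foldl
      (fun p c => if PySem.Set.contains vowels c then (p.1 + 1, p.2) else (p.1, p.2 + 1))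
      (0, 0)
  PySem.Int.mod (st.1 * st.2) 1000000007

-- ===== PORT B =====
def solve_alt (A : String) : Int :=
  let count_v : Int :=
    "aeiou".toList.foldl (fun acc v => acc + (PySem.Str.count A (String.ofList [v]) : Int)) 0
  PySem.Int.mod (count_v * (PySem.Str.len A - count_v)) 1000000007

-- ===== PRECONDITION & SPEC =====
def Spec_solve (A : String) (out : Int) : Prop := out = solve_alt A
instance (A : String) (out : Int) : Decidable (Spec_solve A out) := by unfold Spec_solve; infer_instance

-- ===== CLAIM =====
def Claim_equal_solve : Prop := ∀ (A : String), Dom_solve A → Spec_solve A (solve A)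

-- ===== LEMMAS AND PROOFS =====

-- Python's str.count with a one-character needle counts occurrences of that character.
lemma count_go_single (c : Char) :
    ∀ (fuel : Nat) (l : List Char) (acc : Nat), l.length ≤ fuel →
      PySem.Chars.count.go [c] fuel l acc = acc + l.count c := by
  intro fuel
  induction fuel with
  | zero =>
    intro l acc h
    cases l with
    | nil => simp [PySem.Chars.count.go]
    | cons a t => simp at h
  | succ n ih =>
    intro l acc h
    cases l with
    | nil => simp [PySem.Chars.count.go]
    | cons a t =>
      simp only [List.length_cons, Nat.succ_le_succ_iff] at h
      by_cases hc : a = c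
      · have hpre : [c].isPrefixOf (a :: t) = true := by simp [hc, List.isPrefixOf]
        simp [PySem.Chars.count.go, ih t (acc + 1) h, hc]
        omega
      · have hpre : [c].isPrefixOf (a :: t) = false := by
          simp [List.isPrefixOf]
          exact fun h' => hc h'.symm
        simp [PySem.Chars.count.go, hpre, ih t acc h, hc]

lemma str_count_single (A : String) (c : Char) :
    PySem.Str.count A (String.ofList [c]) = A.toList.count c := by
  have h := count_go_single c A.toList.length A.toList 0 le_rfl
  have hne : String.ofList [c] ≠ "" := by
    intro he
    have h2 := congrArg String.toList he
    simp at h2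
  simp [PySem.Str.count, PySem.Chars.count]
  simpa using h

-- A's two-counter loop computes (count of pred, count of ¬pred).
lemma solve_foldl (pred : Char → Bool) (l : List Char) (p : Int × Int) :
    l.foldl (fun p c => if pred c then (p.1 + 1, p.2) else (p.1, p.2 + 1)) p
      = (p.1 + l.countP pred, p.2 + l.countP (fun c => !pred c)) := by
  induction l generalizing p with
  | nil => simp
  | cons c l ih =>
    by_cases h : pred c <;>
      · simp [h, ih]
        omega

lemma vowel_test :
    PySem.Set.contains (PySem.Set.ofList ['a','e','i','o','u'])
      = fun c => ['a','e','i','o','u'].contains c := rfl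

-- Membership in the vowel list splits into the five individual character counts.
lemma countP_vowels (l : List Char) :
    l.countP (fun c => ['a','e','i','o','u'].contains c)
      = l.count 'a' + l.count 'e' + l.count 'i' + l.count 'o' + l.count 'u' := by
  induction l with
  | nil => simp
  | cons c t ih =>
    simp only [List.countP_cons, List.count_cons, ih]
    by_cases h1 : c = 'a' <;> by_cases h2 : c = 'e' <;> by_cases h3 : c = 'i' <;>
      by_cases h4 : c = 'o' <;> by_cases h5 : c = 'u' <;>
      simp_all <;> omega

-- ===== VERDICT =====
theorem solve_spec : Claim_equal_solve := by
  intro A _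
  unfold Spec_solve solve solve_alt
  simp only []
  rw [vowel_test, solve_foldl]
  have hB : ((PySem.Str.count A (String.ofList ['a']) : Int)
      + (PySem.Str.count A (String.ofList ['e']) : Int)
      + (PySem.Str.count A (String.ofList ['i']) : Int)
      + (PySem.Str.count A (String.ofList ['o']) : Int)
      + (PySem.Str.count A (String.ofList ['u']) : Int))
      = (A.toList.countP (fun c => ['a','e','i','o','u'].contains c) : Int) := by
    simp only [str_count_single, countP_vowels]
    push_cast
    ring
  have hlen : A.toList.countP (fun c => ['a','e','i','o','u'].contains c)
      + A.toList.countP (fun c => !(List.contains ['a','e','i','o','u'] c)) = A.toList.length := by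
    simpa [decide_not] using
      (List.length_eq_countP_add_countP (fun c => ['a','e','i','o','u'].contains c)
        (l := A.toList)).symm
  have haeiou : "aeiou".toList = ['a','e','i','o','u'] := rfl
  simp only [haeiou, List.foldl, hB, PySem.Str.len_eq, zero_add]
  congr 1
  have : ((A.toList.countP fun c => !(List.contains ['a','e','i','o','u'] c)) : Int)
      = (A.toList.length : Int) - (A.toList.countP (fun c => ['a','e','i','o','u'].contains c) : Int) := by
    omega
  rw [this]
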